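-- pv_equiv track=rewrite | github.com/bbookng/Programmers | Greedy/구명보트.py | solution
-- ===== SOURCE A (Python) =====
-- def solution(people, limit):
--     boats = [0]
--     for person in people:
--         for i in range(len(boats)):
--             if person + boats[i] <= limit:
--                 boats[i] += person
--                 break
--         else:
--             boats.append(person)
--
--     return len(boats)
-- ===== SOURCE B (Python) =====
-- def solution(people, limit):
--     # Segment tree (min over boat loads) replaces A's linear first-fit scan:
--     # the leftmost boat with load <= limit - person is found by tree descent.
--     cap = 1
--     while cap < len(people) + 1:
--         cap *= 2
--     tree = [0] * (2 * cap)  # leaves cap..2cap-1 are boat loads (unused slots 0)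
--
--     def query(node, lo, hi, bound, target):
--         # leftmost index i in [lo, min(hi, bound)) with leaf load <= target, else -1
--         if lo >= bound or tree[node] > target:
--             return -1
--         if hi - lo <= 1:
--             return lo
--         mid = (lo + hi) // 2
--         r = query(2 * node, lo, mid, bound, target)
--         if r != -1:
--             return r
--         return query(2 * node + 1, mid, hi, bound, target)
--
--     used = 1  # boats in use (A starts with one empty boat)
--     for person in people:
--         i = query(1, 0, cap, used, limit - person)
--         if i == -1:
--             i = used
--             used += 1
--             load = person
--         else:
--             load = tree[cap + i] + person
--         node = cap + i
--         tree[node] = load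
--         node //= 2
--         while node >= 1:
--             tree[node] = min(tree[2 * node], tree[2 * node + 1])
--             node //= 2
--     return used
-- ===== Notes on version B (the rewrite author's own statement) =====
-- stated objective: alternative
-- what changed: B replaces A's growing-list linear first-fit scan with a fixed-capacity min-segment-tree over boat loads: the leftmost boat with load <= limit - person is found by tree descent and the path is recomputed bottom-up.
import Mathlib
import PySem

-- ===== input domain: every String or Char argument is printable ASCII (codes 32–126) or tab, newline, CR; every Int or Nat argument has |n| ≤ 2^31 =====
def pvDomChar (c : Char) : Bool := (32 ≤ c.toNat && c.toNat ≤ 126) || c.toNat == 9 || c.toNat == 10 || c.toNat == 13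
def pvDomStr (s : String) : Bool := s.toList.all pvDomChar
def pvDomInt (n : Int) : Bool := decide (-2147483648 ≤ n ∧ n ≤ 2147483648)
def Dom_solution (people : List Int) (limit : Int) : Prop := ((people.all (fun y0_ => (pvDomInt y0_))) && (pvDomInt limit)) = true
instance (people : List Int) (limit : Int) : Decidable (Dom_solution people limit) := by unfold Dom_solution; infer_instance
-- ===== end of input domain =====

-- B: an alternative first-fit implementation via a min-segment-tree over boat
-- loads (leftmost boat with load ≤ limit - person by tree descent); same boat count.

-- ===== PORT A =====
-- inner `for i in range(len(boats)) … else: append` loop of A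
def placeLoop (fuel : Nat) (boats : List Int) (person limit : Int) (i : Nat) : List Int :=
  match fuel with
  | 0 => boats ++ [person]
  | f+1 =>
    if i < boats.length then
      if person + boats.getD i 0 ≤ limit then boats.set i (boats.getD i 0 + person)
      else placeLoop f boats person limit (i+1)
    else boats ++ [person]

def solution (people : List Int) (limit : Int) : Int :=
  ((people.foldl (fun boats person => placeLoop boats.length boats person limit 0) [0]).length : Int)

-- ===== PORT B =====
-- `while cap < n: cap *= 2` (the cap = 0 branch is a totality guard only; B calls it with cap = 1)
def capLoop (fuel cap n : Nat) : Nat :=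
  match fuel with
  | 0 => cap
  | f+1 => if cap < n then capLoop f (cap * 2) n else cap

-- `query(node, lo, hi, bound, target)` of Source B: leftmost index in [lo, min(hi,bound))
-- whose leaf value is ≤ target, else -1
def segQuery (fuel : Nat) (tree : List Int) (node lo hi bound : Nat) (target : Int) : Int :=
  match fuel with
  | 0 => -1
  | f+1 =>
    if bound ≤ lo ∨ target < tree.getD node 0 then -1
    else if hi - lo ≤ 1 then (lo : Int)
    else
      let mid := (lo + hi) / 2
      let r := segQuery f tree (2*node) lo mid bound target
      if r ≠ -1 then r else segQuery f tree (2*node+1) mid hi bound target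

-- the `node //= 2; while node >= 1: …` bottom-up recomputation loop of Source B
def segUp (fuel : Nat) (tree : List Int) (node : Nat) : List Int :=
  match fuel with
  | 0 => tree
  | f+1 =>
    if 1 ≤ node then
      segUp f (tree.set node (min (tree.getD (2*node) 0) (tree.getD (2*node+1) 0))) (node / 2)
    else tree

-- body of B's `for person in people` loop; state = (tree, used)
def altStep (limit : Int) (cap : Nat) (st : List Int × Nat) (person : Int) : List Int × Nat :=
  let tree := st.1
  let used := st.2
  let q := segQuery cap tree 1 0 cap used (limit - person)
  let idx : Nat := if q = -1 then used else q.toNat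
  let used' : Nat := if q = -1 then used + 1 else used
  let load : Int := if q = -1 then person else tree.getD (cap + idx) 0 + person
  (segUp (cap + idx) (tree.set (cap + idx) load) ((cap + idx) / 2), used')

def solution_alt (people : List Int) (limit : Int) : Int :=
  let cap := capLoop (people.length + 1) 1 (people.length + 1)
  let res := people.foldl (altStep limit cap) (List.replicate (2*cap) 0, 1)
  (res.2 : Int)

-- ===== PRECONDITION & SPEC =====
def Spec_solution (people : List Int) (limit : Int) (out : Int) : Prop := out = solution_alt people limit
instance (people : List Int) (limit : Int) (out : Int) : Decidable (Spec_solution people limit out) := by unfold Spec_solution; infer_instance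

-- ===== CLAIM (what is proved, stated in full; the proofs are below) =====
def Claim_equal_solution : Prop := ∀ (people : List Int) (limit : Int), Dom_solution people limit → Spec_solution people limit (solution people limit)

-- ===== LEMMAS AND PROOFS =====

-- leftmost index with value ≤ t (specification yardstick for both ports)
def ffIdx? (l : List Int) (t : Int) : Option Nat :=
  match l with
  | [] => none
  | x :: xs => if x ≤ t then some 0 else (ffIdx? xs t).map (· + 1)

-- the linear scan segQuery is proved equal to
def linFind (tree : List Int) (cap lo cnt bound : Nat) (t : Int) : Int :=
  match cnt with
  | 0 => -1
  | c+1 => if lo < bound ∧ tree.getD (cap+lo) 0 ≤ t then (lo:Int)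
           else linFind tree cap (lo+1) c bound t

-- internal-node minimum property of the tree
def WF (tree : List Int) (cap : Nat) : Prop :=
  ∀ m, 1 ≤ m → m < cap → tree.getD m 0 = min (tree.getD (2*m) 0) (tree.getD (2*m+1) 0)

-- simulation invariant: tree leaves j < cap carry A's boat loads (0 beyond)
def SInv (boats tree : List Int) (cap : Nat) : Prop :=
  tree.length = 2*cap ∧ WF tree cap ∧ ∀ j, j < cap → tree.getD (cap+j) 0 = boats.getD j 0

-- ---- getD toolbox ----
lemma getD_set_self (l : List Int) (i : Nat) (v : Int) (h : i < l.length) :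
    (l.set i v).getD i 0 = v := by
  simp [List.getD, List.getElem?_set_self, h]

lemma getD_set_ne (l : List Int) (i j : Nat) (v : Int) (h : i ≠ j) :
    (l.set i v).getD j 0 = l.getD j 0 := by
  simp [List.getD, List.getElem?_set_ne h]

lemma getD_of_len_le (l : List Int) (j : Nat) (h : l.length ≤ j) : l.getD j 0 = 0 := by
  simp [List.getD, List.getElem?_eq_none h]

lemma getD_eq_getElem (l : List Int) (i : Nat) (h : i < l.length) : l.getD i 0 = l[i] := by
  simp [List.getD, List.getElem?_eq_getElem h]

lemma getD_append_lt (l l' : List Int) (j : Nat) (h : j < l.length) :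
    (l ++ l').getD j 0 = l.getD j 0 := by
  simp [List.getD, List.getElem?_append_left h]

lemma getD_append_len (l : List Int) (v : Int) : (l ++ [v]).getD l.length 0 = v := by
  simp [List.getD, List.getElem?_append_right (le_refl l.length)]

-- ---- A's inner loop is the leftmost-fit update ----
lemma ffIdx?_lt_length {l : List Int} {t : Int} {j : Nat} (h : ffIdx? l t = some j) :
    j < l.length := by
  induction l generalizing j with
  | nil => simp [ffIdx?] at h
  | cons x xs ih =>
    simp only [ffIdx?] at h
    split at h
    · simp at h ⊢; omega
    · simp only [Option.map_eq_some_iff] at h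
      obtain ⟨a, ha, rfl⟩ := h
      have := ih ha; simp; omega

lemma placeLoop_eq (boats : List Int) (p lim : Int) : ∀ (n i : Nat), boats.length ≤ i + n →
    placeLoop n boats p lim i =
      match ffIdx? (boats.drop i) (lim - p) with
      | some j => boats.set (i+j) (boats.getD (i+j) 0 + p)
      | none => boats ++ [p] := by
  intro n
  induction n with
  | zero =>
    intro i hi
    rw [List.drop_eq_nil_of_le (by omega)]
    rfl
  | succ n ih =>
    intro i hi
    simp only [placeLoop]
    by_cases h : i < boats.length
    · rw [if_pos h]
      have hdrop : boats.drop i = boats[i] :: boats.drop (i+1) := List.drop_eq_getElem_cons h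
      have hgd : boats.getD i 0 = boats[i] := getD_eq_getElem boats i h
      rw [hdrop]
      simp only [ffIdx?]
      by_cases hfit : boats[i] ≤ lim - p
      · rw [if_pos hfit, if_pos (by omega)]
        simp
      · rw [if_neg hfit, if_neg (by omega), ih (i+1) (by omega)]
        cases hf : ffIdx? (boats.drop (i+1)) (lim - p) with
        | none => simp [hf]
        | some j =>
          simp only [hf, Option.map_some]
          have : i + 1 + j = i + (j + 1) := by omega
          rw [this]
    · rw [if_neg h, List.drop_eq_nil_of_le (by omega)]
      rfl

-- ---- linFind facts ----
lemma linFind_of_bound_le (tree : List Int) (cap : Nat) : ∀ (cnt lo bound : Nat) (t : Int),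
    bound ≤ lo → linFind tree cap lo cnt bound t = -1 := by
  intro cnt
  induction cnt with
  | zero => intro lo bound t _; rfl
  | succ c ih =>
    intro lo bound t h
    simp only [linFind]
    rw [if_neg (by omega), ih (lo+1) bound t (by omega)]

lemma linFind_of_all_gt (tree : List Int) (cap : Nat) : ∀ (cnt lo bound : Nat) (t : Int),
    (∀ j, lo ≤ j → j < lo + cnt → t < tree.getD (cap+j) 0) →
    linFind tree cap lo cnt bound t = -1 := by
  intro cnt
  induction cnt with
  | zero => intro lo bound t _; rfl
  | succ c ih =>
    intro lo bound t h
    have h0 := h lo (le_refl _) (by omega)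
    simp only [linFind]
    rw [if_neg (by omega), ih (lo+1) bound t (fun j hj hj2 => h j (by omega) (by omega))]

lemma linFind_split (tree : List Int) (cap bound : Nat) (t : Int) : ∀ (a b lo : Nat),
    linFind tree cap lo (a+b) bound t =
      (if linFind tree cap lo a bound t ≠ -1 then linFind tree cap lo a bound t
       else linFind tree cap (lo+a) b bound t) := by
  intro a
  induction a with
  | zero => intro b lo; simp [linFind]
  | succ c ih =>
    intro b lo
    have e1 : c + 1 + b = (c + b) + 1 := by omega
    have hL : linFind tree cap lo ((c+b)+1) bound t
        = if lo < bound ∧ tree.getD (cap+lo) 0 ≤ t then (lo:Int)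
          else linFind tree cap (lo+1) (c+b) bound t := rfl
    have hu : linFind tree cap lo (c+1) bound t
        = if lo < bound ∧ tree.getD (cap+lo) 0 ≤ t then (lo:Int)
          else linFind tree cap (lo+1) c bound t := rfl
    rw [e1, hL, hu]
    by_cases h1 : lo < bound ∧ tree.getD (cap+lo) 0 ≤ t
    · rw [if_pos h1, if_pos h1, if_pos (by omega)]
    · rw [if_neg h1, if_neg h1, ih b (lo+1),
        show lo + 1 + c = lo + (c+1) from by omega]

-- ---- tree node dominates its subtree's leaves ----
lemma subtree_min_le (tree : List Int) (cap : Nat) (hwf : WF tree cap) :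
    ∀ d node lo, 1 ≤ node → node * 2^d = cap + lo → lo + 2^d ≤ cap →
      ∀ j, j < 2^d → tree.getD node 0 ≤ tree.getD (cap+lo+j) 0 := by
  intro d
  induction d with
  | zero =>
    intro node lo _ hnode hle j hj
    interval_cases j
    simp at hnode
    simp [hnode]
  | succ d ih =>
    intro node lo hn1 hnode hle j hj
    have hpow : (2:Nat)^(d+1) = 2^d + 2^d := by rw [pow_succ]; omega
    have hnlt : node < cap := by
      by_contra hcon
      push_neg at hcon
      have h1 : cap * 2^(d+1) ≤ node * 2^(d+1) := Nat.mul_le_mul_right _ hcon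
      have h2 : cap * 2 ≤ cap * 2^(d+1) :=
        Nat.mul_le_mul_left _ (by have := Nat.one_le_two_pow (n := d); omega)
      omega
    have hmin := hwf node hn1 hnlt
    have hLnode : 2*node * 2^d = cap + lo := by
      calc 2*node * 2^d = node * 2^(d+1) := by ring
      _ = cap + lo := hnode
    have hRnode : (2*node+1) * 2^d = cap + (lo + 2^d) := by
      calc (2*node+1) * 2^d = node * 2^(d+1) + 2^d := by ring
      _ = cap + (lo + 2^d) := by rw [hnode]; omega
    by_cases hjd : j < 2^d
    · have hL := ih (2*node) lo (by omega) hLnode (by omega) j hjd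
      omega
    · have hR := ih (2*node+1) (lo + 2^d) (by omega) hRnode (by omega) (j - 2^d) (by omega)
      have heq : cap + (lo + 2^d) + (j - 2^d) = cap + lo + j := by omega
      rw [heq] at hR
      omega

-- ---- the segment-tree query equals the linear scan ----
lemma segQuery_eq_linFind (tree : List Int) (cap : Nat) (hwf : WF tree cap) :
    ∀ d fuel node lo bound t, d < fuel → 1 ≤ node → node * 2^d = cap + lo → lo + 2^d ≤ cap →
      segQuery fuel tree node lo (lo + 2^d) bound t = linFind tree cap lo (2^d) bound t := by
  intro d
  induction d with
  | zero =>
    intro fuel node lo bound t hfuel _ hnode hle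
    obtain ⟨f, rfl⟩ : ∃ f, fuel = f + 1 := ⟨fuel - 1, by omega⟩
    simp only [pow_zero] at hnode hle ⊢
    have hnd : node = cap + lo := by omega
    simp only [segQuery]
    by_cases hb : bound ≤ lo ∨ t < tree.getD node 0
    · rw [if_pos hb]
      have : ¬ (lo < bound ∧ tree.getD (cap+lo) 0 ≤ t) := by
        rw [← hnd]; omega
      simp only [linFind]
      rw [if_neg this]
    · push_neg at hb
      rw [if_neg (by push_neg; exact hb), if_pos (by omega)]
      simp only [linFind]
      rw [if_pos (by rw [← hnd]; exact ⟨by omega, by omega⟩)]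
  | succ d ih =>
    intro fuel node lo bound t hfuel hn1 hnode hle
    obtain ⟨f, rfl⟩ : ∃ f, fuel = f + 1 := ⟨fuel - 1, by omega⟩
    have hpow : (2:Nat)^(d+1) = 2^d + 2^d := by rw [pow_succ]; omega
    have hLnode : 2*node * 2^d = cap + lo := by
      calc 2*node * 2^d = node * 2^(d+1) := by ring
      _ = cap + lo := hnode
    have hRnode : (2*node+1) * 2^d = cap + (lo + 2^d) := by
      calc (2*node+1) * 2^d = node * 2^(d+1) + 2^d := by ring
      _ = cap + (lo + 2^d) := by rw [hnode]; omega
    simp only [segQuery]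
    by_cases hb : bound ≤ lo
    · rw [if_pos (Or.inl hb), linFind_of_bound_le tree cap _ lo bound t hb]
    · by_cases hm : t < tree.getD node 0
      · rw [if_pos (Or.inr hm)]
        rw [linFind_of_all_gt tree cap _ lo bound t]
        intro j hj1 hj2
        have hs := subtree_min_le tree cap hwf (d+1) node lo hn1 hnode hle (j - lo) (by omega)
        have heq : cap + lo + (j - lo) = cap + j := by omega
        rw [heq] at hs
        omega
      · rw [if_neg (by omega)]
        rw [if_neg (by have := Nat.one_le_two_pow (n := d); omega)]
        have hmid : (lo + (lo + 2^(d+1))) / 2 = lo + 2^d := by rw [hpow]; omega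
        simp only [hmid]
        have hd := Nat.two_pow_pos d
        have hiL := ih f (2*node) lo bound t (by omega) (by omega) hLnode (by omega)
        have hiR := ih f (2*node+1) (lo + 2^d) bound t (by omega) (by omega) hRnode (by omega)
        rw [show lo + 2^(d+1) = lo + 2^d + 2^d from by rw [hpow]; omega]
        rw [hiL, hiR, hpow, linFind_split tree cap bound t (2^d) (2^d) lo]

-- ---- segUp facts ----
lemma segUp_length : ∀ (fuel node : Nat) (tree : List Int),
    (segUp fuel tree node).length = tree.length := by
  intro fuel
  induction fuel with
  | zero => intro node tree; rfl
  | succ f ih =>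
    intro node tree
    simp only [segUp]
    split_ifs with h
    · rw [ih (node/2)]; simp
    · rfl

lemma segUp_getD_notin : ∀ (fuel node : Nat) (tree : List Int) (j : Nat),
    (∀ e : Nat, node / 2^e ≠ j) → (segUp fuel tree node).getD j 0 = tree.getD j 0 := by
  intro fuel
  induction fuel with
  | zero => intro node tree j _; rfl
  | succ f ih =>
    intro node tree j h
    simp only [segUp]
    split_ifs with h1
    · rw [ih (node/2) _ j ?chain, getD_set_ne _ _ _ _ (by simpa using h 0)]
      case chain =>
        intro e
        have := h (e+1)
        rw [show (2:Nat)^(e+1) = 2 * 2^e from by rw [pow_succ]; ring] at this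
        rwa [Nat.div_div_eq_div_mul]
    · rfl

lemma segUp_WF (cap : Nat) : ∀ (fuel node : Nat) (tree : List Int), node ≤ fuel → node < cap →
    tree.length = 2*cap →
    (∀ m, 1 ≤ m → m < cap → (∀ e : Nat, node / 2^e ≠ m) →
      tree.getD m 0 = min (tree.getD (2*m) 0) (tree.getD (2*m+1) 0)) →
    WF (segUp fuel tree node) cap := by
  intro fuel
  induction fuel with
  | zero =>
    intro node tree hf hlt hlen H
    intro m hm1 hm2
    apply H m hm1 hm2
    intro e
    have : node = 0 := by omega
    simp [this]
    omega
  | succ f ih =>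
    intro node tree hf hlt hlen H
    simp only [segUp]
    split_ifs with h1
    · apply ih (node/2) _ (by omega) (by omega) (by simp [hlen])
      intro m hm1 hm2 hchain
      have hm_ne_half : node / 2 ≠ m := by simpa using hchain 0
      have hch_ne : 2*m ≠ node ∧ 2*m + 1 ≠ node := by
        constructor <;> (intro hc; apply hm_ne_half; omega)
      rw [getD_set_ne tree node (2*m) _ (by omega),
        getD_set_ne tree node (2*m+1) _ (by omega)]
      by_cases hmn : m = node
      · rw [hmn, getD_set_self tree node _ (by omega)]
      · rw [getD_set_ne tree node m _ (by omega)]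
        apply H m hm1 hm2
        intro e
        cases e with
        | zero => simpa using fun hc => hmn hc.symm
        | succ e =>
          have := hchain e
          rw [show (2:Nat)^(e+1) = 2 * 2^e from by rw [pow_succ]; ring,
            ← Nat.div_div_eq_div_mul]
          exact this
    · intro m hm1 hm2
      apply H m hm1 hm2
      intro e
      have : node = 0 := by omega
      simp [this]
      omega

-- ---- cap is a power of two at least n ----
lemma capLoop_spec (n : Nat) : ∀ (fuel cap : Nat), n - cap ≤ fuel → 1 ≤ cap →
    (∃ e, cap = 2^e) → (∃ e, capLoop fuel cap n = 2^e) ∧ n ≤ capLoop fuel cap n := by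
  intro fuel
  induction fuel with
  | zero =>
    intro cap hf h1 he
    simp only [capLoop]
    exact ⟨he, by omega⟩
  | succ f ih =>
    intro cap hf h1 he
    simp only [capLoop]
    split_ifs with h2
    · exact ih (cap * 2) (by omega) (by omega)
        (by obtain ⟨e, rfl⟩ := he; exact ⟨e+1, by rw [pow_succ]⟩)
    · exact ⟨he, by omega⟩

-- ---- linFind over the leaves is ffIdx? over the boats ----
lemma linFind_eq_ffIdx (tree boats : List Int) (cap : Nat) (t : Int)
    (hleaf : ∀ j, j < boats.length → tree.getD (cap+j) 0 = boats.getD j 0) :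
    ∀ (cnt lo : Nat), boats.length ≤ lo + cnt →
      linFind tree cap lo cnt boats.length t =
        (match ffIdx? (boats.drop lo) t with
         | some j => ((lo + j : Nat) : Int)
         | none => -1) := by
  intro cnt
  induction cnt with
  | zero =>
    intro lo h
    rw [List.drop_eq_nil_of_le (by omega)]
    rfl
  | succ c ih =>
    intro lo h
    by_cases hlo : lo < boats.length
    · have hdrop : boats.drop lo = boats[lo] :: boats.drop (lo+1) := List.drop_eq_getElem_cons hlo
      have hgd : tree.getD (cap+lo) 0 = boats[lo] := by
        rw [hleaf lo hlo]; exact getD_eq_getElem boats lo hlo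
      rw [hdrop]
      simp only [ffIdx?, linFind]
      by_cases hfit : boats[lo] ≤ t
      · rw [if_pos hfit, if_pos ⟨hlo, by omega⟩]
        simp
      · rw [if_neg hfit, if_neg (by omega), ih (lo+1) (by omega)]
        cases hf : ffIdx? (boats.drop (lo+1)) t with
        | none => simp [hf]
        | some j =>
          simp only [hf, Option.map_some]
          congr 1
          omega
    · rw [linFind_of_bound_le tree cap _ lo boats.length t (by omega),
        List.drop_eq_nil_of_le (by omega)]
      rfl

-- ---- one update keeps the simulation invariant ----
lemma update_inv (tree boats boats' : List Int) (cap idx : Nat) (load : Int)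
    (hlenT : tree.length = 2*cap) (hwf : WF tree cap)
    (hleaf : ∀ j, j < cap → tree.getD (cap+j) 0 = boats.getD j 0)
    (hidx : idx < cap)
    (hb' : ∀ j, j < cap → boats'.getD j 0 = if j = idx then load else boats.getD j 0) :
    SInv boats' (segUp (cap+idx) (tree.set (cap+idx) load) ((cap+idx)/2)) cap := by
  have hnd : (cap + idx) / 2 < cap := by omega
  refine ⟨by rw [segUp_length]; simp [hlenT], ?_, ?_⟩
  · apply segUp_WF cap (cap+idx) _ _ (by omega) hnd (by simp [hlenT])
    intro m hm1 hm2 hchain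
    have hm_ne : (cap+idx)/2 ≠ m := by simpa using hchain 0
    have h1 : m ≠ cap + idx := by omega
    have h2 : 2*m ≠ cap + idx := by intro hc; apply hm_ne; omega
    have h3 : 2*m + 1 ≠ cap + idx := by intro hc; apply hm_ne; omega
    rw [getD_set_ne tree (cap+idx) m _ (by omega),
      getD_set_ne tree (cap+idx) (2*m) _ (by omega),
      getD_set_ne tree (cap+idx) (2*m+1) _ (by omega)]
    exact hwf m hm1 hm2
  · intro j hj
    rw [segUp_getD_notin (cap+idx) ((cap+idx)/2) _ (cap+j)
      (fun e hc => by have := Nat.div_le_self ((cap+idx)/2) (2^e); omega)]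
    rw [hb' j hj]
    by_cases hji : j = idx
    · subst hji
      rw [if_pos rfl, getD_set_self _ _ _ (by omega)]
    · rw [if_neg hji, getD_set_ne _ _ _ _ (by omega)]
      exact hleaf j hj

-- ---- one step of B simulates one step of A ----
lemma altStep_eq (limit : Int) (cap : Nat) (hk : ∃ k, cap = 2^k)
    (boats tree : List Int) (person : Int)
    (hinv : SInv boats tree cap) (hlen : boats.length < cap) :
    ∃ tree', altStep limit cap (tree, boats.length) person
        = (tree', (placeLoop boats.length boats person limit 0).length)
      ∧ SInv (placeLoop boats.length boats person limit 0) tree' cap := by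
  obtain ⟨k, hkk⟩ := hk
  obtain ⟨hlenT, hwf, hleaf⟩ := hinv
  have hq : segQuery cap tree 1 0 cap boats.length (limit - person)
      = (match ffIdx? boats (limit - person) with
         | some j => ((j : Nat) : Int) | none => -1) := by
    have h0 := segQuery_eq_linFind tree cap hwf k cap 1 0 boats.length (limit - person)
      (by rw [hkk]; exact Nat.lt_two_pow_self) (le_refl 1) (by rw [hkk]; omega) (by rw [hkk]; omega)
    simp only [Nat.zero_add] at h0
    rw [← hkk] at h0
    rw [h0, linFind_eq_ffIdx tree boats cap (limit - person)
      (fun j hj => hleaf j (by omega)) cap 0 (by omega)]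
    simp
  have hplace := placeLoop_eq boats person limit boats.length 0 (by omega)
  simp only [List.drop_zero] at hplace
  cases hf : ffIdx? boats (limit - person) with
  | none =>
    rw [hf] at hq hplace
    have hq' : segQuery cap tree 1 0 cap boats.length (limit - person) = -1 := by rw [hq]
    have hplace' : placeLoop boats.length boats person limit 0 = boats ++ [person] := by rw [hplace]
    refine ⟨segUp (cap + boats.length) (tree.set (cap + boats.length) person) ((cap + boats.length) / 2), ?_, ?_⟩
    · rw [hplace']
      simp [altStep, hq']
    · rw [hplace']
      apply update_inv tree boats _ cap boats.length person hlenT hwf hleaf hlen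
      intro j hj
      by_cases hji : j = boats.length
      · subst hji
        rw [if_pos rfl, getD_append_len]
      · rw [if_neg hji]
        by_cases hjl : j < boats.length
        · exact getD_append_lt _ _ _ hjl
        · rw [getD_of_len_le _ _ (by simp; omega), getD_of_len_le _ _ (by omega)]
  | some j =>
    have hjlt : j < boats.length := ffIdx?_lt_length hf
    rw [hf] at hq hplace
    have hq' : segQuery cap tree 1 0 cap boats.length (limit - person) = ((j : Nat) : Int) := by
      rw [hq]
    have hplace' : placeLoop boats.length boats person limit 0
        = boats.set j (boats.getD j 0 + person) := by rw [hplace]; norm_num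
    have hne : ((j : Nat) : Int) ≠ -1 := by omega
    have hjc : j < cap := by omega
    have hld : tree.getD (cap + j) 0 = boats.getD j 0 := hleaf j hjc
    have hld' : tree[cap+j]?.getD 0 = boats[j]?.getD 0 := by simpa [List.getD] using hld
    refine ⟨segUp (cap + j) (tree.set (cap + j) (boats.getD j 0 + person)) ((cap + j) / 2), ?_, ?_⟩
    · rw [hplace']
      simp [altStep, hq', hne, List.getD, hld']
    · rw [hplace']
      apply update_inv tree boats _ cap j (boats.getD j 0 + person) hlenT hwf hleaf hjc
      intro j' hj'
      by_cases hji : j' = j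
      · subst hji
        rw [if_pos rfl, getD_set_self _ _ _ hjlt]
      · rw [if_neg hji, getD_set_ne _ _ _ _ (by omega)]

-- ---- the whole folds agree ----
lemma fold_sim (limit : Int) (cap : Nat) (hk : ∃ k, cap = 2^k) :
    ∀ (rest boats tree : List Int), SInv boats tree cap →
      boats.length + rest.length ≤ cap →
      (rest.foldl (altStep limit cap) (tree, boats.length)).2 =
        (rest.foldl (fun b p => placeLoop b.length b p limit 0) boats).length := by
  intro rest
  induction rest with
  | nil => intro boats tree _ _; rfl
  | cons person rest ih =>
    intro boats tree hinv hlen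
    have hlt : boats.length < cap := by simp at hlen; omega
    obtain ⟨tree', hstep, hinv'⟩ := altStep_eq limit cap hk boats tree person hinv hlt
    simp only [List.foldl_cons]
    rw [hstep]
    have hlen' : (placeLoop boats.length boats person limit 0).length ≤ boats.length + 1 := by
      rw [placeLoop_eq boats person limit boats.length 0 (by omega)]
      cases h : ffIdx? (boats.drop 0) (limit - person) <;> simp [h]
    exact ih _ tree' hinv' (by simp at hlen ⊢; omega)

-- ===== VERDICT (by name: the statement is the Claim_ definition above) =====
theorem solution_spec : Claim_equal_solution := by
  intro people limit _
  unfold Spec_solution solution solution_alt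
  obtain ⟨⟨k, hk⟩, hge⟩ := capLoop_spec (people.length + 1) (people.length + 1) 1
    (by omega) (le_refl 1) ⟨0, rfl⟩
  set cap := capLoop (people.length + 1) 1 (people.length + 1) with hc
  have hinv : SInv [0] (List.replicate (2*cap) 0) cap := by
    have g : ∀ i : Nat, (List.replicate (2*cap) (0:Int)).getD i 0 = 0 := by
      intro i
      by_cases h : i < 2*cap <;> simp [List.getD, List.getElem?_replicate, h]
    refine ⟨by simp, ?_, ?_⟩
    · intro m h1 h2; simp [g]
    · intro j hj
      rw [g]
      rcases j with _ | j <;> simp [List.getD]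
  have hmain := fold_sim limit cap ⟨k, hk⟩ people [0] (List.replicate (2*cap) 0) hinv
    (by simp; omega)
  norm_num at hmain
  exact congrArg (fun n : Nat => (n : Int)) hmain.symm
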